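-- pv_equiv track=rewrite | github.com/dimas-tri-sulaksono/xsis-assignment-2023 | BLQ/soal_17.py | hitung_gunung_lembah
-- ===== SOURCE A (Python) =====
-- def hitung_gunung_lembah(urutan):
--     jumlah_gunung = 0
--     jumlah_lembah = 0
--
--     ketinggian = 0
--     sedang_naik = False
--
--     for langkah in urutan:
--         if langkah == 'N':
--             ketinggian += 1
--         elif langkah == 'T':
--             ketinggian -= 1
--
--         # Cek jika Hattori sedang di puncak gunung
--         if ketinggian == 0 and langkah == 'N':
--             jumlah_gunung += 1
--         # Cek jika Hattori sedang di dasar lembah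
--         elif ketinggian == 0 and langkah == 'T':
--             jumlah_lembah += 1
--
--     return jumlah_gunung, jumlah_lembah
-- ===== SOURCE B (Python) =====
-- def hitung_gunung_lembah(urutan):
--     # two-pass: build inclusive prefix-sum elevation table, then count zero crossings
--     steps = list(urutan)
--     heights = []
--     h = 0
--     for s in steps:
--         h += 1 if s == 'N' else -1 if s == 'T' else 0
--         heights.append(h)
--     gunung = sum(1 for s, k in zip(steps, heights) if k == 0 and s == 'N')
--     lembah = sum(1 for s, k in zip(steps, heights) if k == 0 and s == 'T')
--     return gunung, lembah
-- ===== Notes on version B (the rewrite author's own statement) =====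
-- stated objective: alternative
-- what changed: Replaced A's single stateful loop (running height + two counters updated in branch order) by a two-pass design: first build the inclusive prefix-sum elevation table, then count peaks and valleys with two declarative zip/filter passes.
import Mathlib
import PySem

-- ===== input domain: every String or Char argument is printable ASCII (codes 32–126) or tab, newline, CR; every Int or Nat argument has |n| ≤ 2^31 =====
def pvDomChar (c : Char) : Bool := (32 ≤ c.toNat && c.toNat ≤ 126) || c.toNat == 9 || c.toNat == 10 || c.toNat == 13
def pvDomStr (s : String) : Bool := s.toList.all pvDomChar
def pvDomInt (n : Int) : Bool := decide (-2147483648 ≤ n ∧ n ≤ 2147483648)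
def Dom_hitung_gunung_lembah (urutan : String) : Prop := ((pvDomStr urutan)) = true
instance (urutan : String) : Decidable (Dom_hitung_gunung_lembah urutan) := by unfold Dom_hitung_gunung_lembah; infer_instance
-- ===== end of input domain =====

-- B replaces A's single stateful loop by a two-pass design (prefix-sum elevation
-- table, then two zip/filter counting passes); same O(n) cost, alternative structure.

-- ===== PORT A =====
-- state: (jumlah_gunung, jumlah_lembah, ketinggian); sedang_naik in A is dead (never read)
def hgl_step (s : Int × Int × Int) (langkah : Char) : Int × Int × Int :=
  let k := if langkah == 'N' then s.2.2 + 1 else if langkah == 'T' then s.2.2 - 1 else s.2.2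
  if k == 0 && langkah == 'N' then (s.1 + 1, s.2.1, k)
  else if k == 0 && langkah == 'T' then (s.1, s.2.1 + 1, k)
  else (s.1, s.2.1, k)

def hitung_gunung_lembah (urutan : String) : Int × Int :=
  let r := urutan.toList.foldl hgl_step (0, 0, 0)
  (r.1, r.2.1)

-- ===== PORT B =====
def hgl_delta (c : Char) : Int := if c == 'N' then 1 else if c == 'T' then -1 else 0

-- inclusive prefix sums of the deltas, starting from height h
def hgl_heights : List Char → Int → List Int
  | [], _ => []
  | c :: cs, h => (h + hgl_delta c) :: hgl_heights cs (h + hgl_delta c)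

def hitung_gunung_lembah_alt (urutan : String) : Int × Int :=
  let steps := urutan.toList
  let heights := hgl_heights steps 0
  let gunung : Int := ((steps.zip heights).filter (fun p => p.2 == 0 && p.1 == 'N')).length
  let lembah : Int := ((steps.zip heights).filter (fun p => p.2 == 0 && p.1 == 'T')).length
  (gunung, lembah)

-- ===== PRECONDITION & SPEC =====
def Spec_hitung_gunung_lembah (urutan : String) (out : Int × Int) : Prop := out = hitung_gunung_lembah_alt urutan
instance (urutan : String) (out : Int × Int) : Decidable (Spec_hitung_gunung_lembah urutan out) := by unfold Spec_hitung_gunung_lembah; infer_instance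

-- ===== CLAIM (what is proved, stated in full; the proofs are below) =====
def Claim_equal_hitung_gunung_lembah : Prop := ∀ (urutan : String), Dom_hitung_gunung_lembah urutan → Spec_hitung_gunung_lembah urutan (hitung_gunung_lembah urutan)

-- ===== LEMMAS AND PROOFS =====
theorem hgl_fold_eq (cs : List Char) : ∀ (g l h : Int),
    cs.foldl hgl_step (g, l, h) =
      (g + (((cs.zip (hgl_heights cs h)).filter (fun p => p.2 == 0 && p.1 == 'N')).length : Int),
       l + (((cs.zip (hgl_heights cs h)).filter (fun p => p.2 == 0 && p.1 == 'T')).length : Int),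
       h + (cs.map hgl_delta).sum) := by
  induction cs with
  | nil => intro g l h; simp [hgl_heights]
  | cons c cs ih =>
    intro g l h
    have hk : (if c == 'N' then h + 1 else if c == 'T' then h - 1 else h) = h + hgl_delta c := by
      unfold hgl_delta; split_ifs <;> ring
    simp only [List.foldl_cons, hgl_step, hk, hgl_heights, List.zip_cons_cons,
      List.filter_cons, List.map_cons, List.sum_cons]
    split_ifs <;> simp_all [ih] <;> push_cast <;> omega
-- ===== VERDICT (by name: the statement is the Claim_ definition above) =====
theorem hitung_gunung_lembah_spec : Claim_equal_hitung_gunung_lembah := by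
  intro urutan _
  unfold Spec_hitung_gunung_lembah hitung_gunung_lembah hitung_gunung_lembah_alt
  simp [hgl_fold_eq]
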